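-- pv_equiv track=rewrite | github.com/damiancubilla27/pp_lab1_cubilla_damian | parcial.py | sacar_minimo
-- ===== SOURCE A (Python) =====
-- def sacar_maximo(lista:list,key:str, clave:str):
--     '''
--     Funcion: Funcion que se encarga de sacar el numero maximo de la lista en base a la claves pasadas por parametro.
--     Parametro:
--     -lista(list): Una lista de diccionario que cada elemento tiene su clave y valor para ser analizada.
--     -key(str): Clave de jugador para acceder.
--     -clave(str): Clave que nos permite acceder al valor.
--     Retorno: En caso de error retorna -1.
--     '''
--     maximo = 0
--     retorno = -1
--     if(lista == [] or key == None or clave == None):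
--         return retorno
--     else:
--         for jugador in lista:
--             if(jugador[key][clave] > maximo):
--                 maximo = jugador[key][clave]
--         return maximo
--
-- def sacar_minimo(lista:list,key:str, clave:str):
--     '''
--     Funcion: Funcion que se encarga de sacar el numero minimo de la lista en base a la claves pasadas por parametro.
--     Parametro:
--     -lista(list): Una lista de diccionario que cada elemento tiene su clave y valor para ser analizada.
--     -key(str): Clave de jugador para acceder.
--     -clave(str): Clave que nos permite acceder al valor.
--     Retorno: En caso de error retorna -1.
--     '''
--     minimo = sacar_maximo(lista, key, clave)
--     retorno = -1
--     if(lista == [] or key == None or clave == None):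
--         return retorno
--     else:
--         for jugador in lista:
--             if(jugador[key][clave] < minimo):
--                 minimo = jugador[key][clave]
--         return minimo
-- ===== SOURCE B (Python) =====
-- def sacar_minimo(lista, key, clave):
--     if lista == [] or key is None or clave is None:
--         return -1
--     return min(jugador[key][clave] for jugador in lista)
-- ===== Notes on version B (the rewrite author's own statement) =====
-- stated objective: simpler
-- what changed: B replaces A's two full scans (a max-seeding call to sacar_maximo followed by a min loop) with a single builtin min over a generator after the same empty/None guard.
import Mathlib
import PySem

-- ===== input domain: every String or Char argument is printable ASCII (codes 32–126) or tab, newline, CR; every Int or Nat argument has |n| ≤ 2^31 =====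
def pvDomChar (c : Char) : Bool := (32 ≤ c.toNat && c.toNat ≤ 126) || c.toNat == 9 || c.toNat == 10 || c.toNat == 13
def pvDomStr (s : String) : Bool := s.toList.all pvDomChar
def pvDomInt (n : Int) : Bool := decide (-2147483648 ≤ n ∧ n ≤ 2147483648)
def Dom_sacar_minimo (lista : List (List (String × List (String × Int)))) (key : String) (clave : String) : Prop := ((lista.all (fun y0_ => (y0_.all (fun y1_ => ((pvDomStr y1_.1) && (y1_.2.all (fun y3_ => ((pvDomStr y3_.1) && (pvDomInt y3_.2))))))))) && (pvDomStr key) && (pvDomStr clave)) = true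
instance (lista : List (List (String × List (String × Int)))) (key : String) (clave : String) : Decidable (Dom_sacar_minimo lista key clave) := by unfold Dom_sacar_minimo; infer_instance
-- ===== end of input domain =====

-- B replaces A's two full scans (max-seeding via sacar_maximo, then a min loop) with one
-- single-pass builtin min after the same empty-list guard; simpler, same exact values on Pre_.

-- ===== PORT A =====
-- first-match association-list lookup = Python dict lookup 'd[k]' (none = KeyError)
def pvLook {ν : Type} (d : List (String × ν)) (k : String) : Option ν :=
  (d.find? (fun p => p.1 == k)).map Prod.snd

-- 'jugador[key][clave]'; defaults to 0 where Python raises KeyError (those inputs are outside Pre_)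
def pvAccess (j : List (String × List (String × Int))) (key clave : String) : Int :=
  match pvLook j key with
  | none => 0
  | some d => (pvLook d clave).getD 0

-- helper of A (key/clave are Strings here, so the '== None' disjuncts are vacuous)
def sacar_maximo_port (lista : List (List (String × List (String × Int)))) (key : String) (clave : String) : Int :=
  if lista = [] then -1
  else lista.foldl (fun maximo j => if pvAccess j key clave > maximo then pvAccess j key clave else maximo) 0

def sacar_minimo (lista : List (List (String × List (String × Int)))) (key : String) (clave : String) : Int :=
  let minimo := sacar_maximo_port lista key clave
  if lista = [] then -1
  else lista.foldl (fun m j => if pvAccess j key clave < m then pvAccess j key clave else m) minimo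

-- ===== PORT B =====
def sacar_minimo_alt (lista : List (List (String × List (String × Int)))) (key : String) (clave : String) : Int :=
  if lista = [] then -1
  else
    match lista.map (fun j => pvAccess j key clave) with
    | [] => -1   -- unreachable: lista ≠ []
    | v :: vs => vs.foldl min v

-- ===== PRECONDITION & SPEC =====
-- Pre_ excludes exactly the inputs where Python raises KeyError/TypeError: some element
-- of lista lacking 'key' or its inner dict lacking 'clave'.
def Pre_sacar_minimo (lista : List (List (String × List (String × Int)))) (key : String) (clave : String) : Prop :=
  ∀ j ∈ lista, ((pvLook j key).bind (fun d => pvLook d clave)).isSome = true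
instance (lista : List (List (String × List (String × Int)))) (key : String) (clave : String) : Decidable (Pre_sacar_minimo lista key clave) := by unfold Pre_sacar_minimo; infer_instance

def pvWitness_sacar_minimo : (List (List (String × List (String × Int)))) × String × String :=
  ([[("jugador", [("goles", 3)])], [("jugador", [("goles", -2)])]], "jugador", "goles")

def Spec_sacar_minimo (lista : List (List (String × List (String × Int)))) (key : String) (clave : String) (out : Int) : Prop := out = sacar_minimo_alt lista key clave
instance (lista : List (List (String × List (String × Int)))) (key : String) (clave : String) (out : Int) : Decidable (Spec_sacar_minimo lista key clave out) := by unfold Spec_sacar_minimo; infer_instance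

-- ===== CLAIM (what is proved, stated in full; the proofs are below) =====
def Claim_equal_sacar_minimo : Prop := ∀ (lista : List (List (String × List (String × Int)))) (key : String) (clave : String), Dom_sacar_minimo lista key clave → Pre_sacar_minimo lista key clave → Spec_sacar_minimo lista key clave (sacar_minimo lista key clave)

-- ===== LEMMAS AND PROOFS =====

theorem pv_if_lt_eq_min (m v : Int) : (if v < m then v else m) = min m v := by
  rcases lt_or_ge v m with h | h
  · simp [h, min_eq_right h.le]
  · simp [not_lt.2 h, min_eq_left h]

theorem pv_if_gt_eq_max (m v : Int) : (if v > m then v else m) = max m v := by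
  rcases lt_or_ge m v with h | h
  · simp [h, max_eq_right h.le]
  · simp [not_lt.2 h, max_eq_left h]

theorem pv_foldl_min_comm (l : List Int) : ∀ a b : Int, l.foldl min (min a b) = min a (l.foldl min b) := by
  induction l with
  | nil => intro a b; simp
  | cons x xs ih =>
    intro a b
    simp only [List.foldl_cons, min_assoc]
    exact ih a (min b x)

theorem pv_foldl_min_le_foldl_max (l : List Int) : ∀ a b : Int, a ≤ b → l.foldl min a ≤ l.foldl max b := by
  induction l with
  | nil => intro a b h; simpa using h
  | cons x xs ih =>
    intro a b h
    exact ih _ _ (le_trans (min_le_min_right x h) (min_le_max))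

theorem sacar_minimo_spec : Claim_equal_sacar_minimo := by
  intro lista key clave _ _
  unfold Spec_sacar_minimo sacar_minimo sacar_minimo_alt sacar_maximo_port
  cases lista with
  | nil => simp
  | cons j js =>
    have hne : (j :: js : List (List (String × List (String × Int)))) ≠ [] := by simp
    simp only [hne]
    simp only [List.map_cons]
    -- rewrite both folds over lista into folds of min/max over the mapped values
    have hmin : ∀ (s : Int) (L : List (List (String × List (String × Int)))),
        L.foldl (fun m jj => if pvAccess jj key clave < m then pvAccess jj key clave else m) s
          = (L.map (fun jj => pvAccess jj key clave)).foldl min s := by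
      intro s L
      rw [List.foldl_map]
      simp only [pv_if_lt_eq_min]
    have hmax : ∀ (s : Int) (L : List (List (String × List (String × Int)))),
        L.foldl (fun m jj => if pvAccess jj key clave > m then pvAccess jj key clave else m) s
          = (L.map (fun jj => pvAccess jj key clave)).foldl max s := by
      intro s L
      rw [List.foldl_map]
      simp only [pv_if_gt_eq_max]
    rw [hmin, hmax]
    set v := pvAccess j key clave with hv
    set vs := js.map (fun jj => pvAccess jj key clave) with hvs
    -- A = min S (foldl min v vs) where S = foldl max 0 (v::vs); and foldl min v vs ≤ S
    have hS : (List.foldl max 0 (v :: vs)) = List.foldl max (max 0 v) vs := by simp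
    have hle : vs.foldl min v ≤ List.foldl max (max 0 v) vs :=
      pv_foldl_min_le_foldl_max vs v (max 0 v) (le_max_right 0 v)
    calc List.foldl min (List.foldl max 0 (v :: vs)) (v :: vs)
        = List.foldl min (min (List.foldl max 0 (v :: vs)) v) vs := by simp
      _ = min (List.foldl max 0 (v :: vs)) (List.foldl min v vs) := pv_foldl_min_comm vs _ v
      _ = List.foldl min v vs := by rw [hS]; exact min_eq_right hle
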